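-- pv_equiv track=rewrite | github.com/gaudesp/noxbot | utils/formatting.py | _final_filter
-- ===== SOURCE A (Python) =====
-- def _final_filter(content: str) -> str:
--   lines = content.splitlines()
--   filtered = []
--   i = 0
--   while i < len(lines):
--     raw = lines[i]
--     indent = raw[: len(raw) - len(raw.lstrip('\u00A0 '))]
--     stripped = raw.strip()
--     if stripped.startswith('**') and stripped.endswith('**') and stripped.count('**') == 2:
--       filtered.append(stripped)
--       i += 1
--       continue
--     if stripped.startswith('**') and stripped.endswith('**'):
--       next_stripped = lines[i + 1].strip() if i + 1 < len(lines) else ''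
--       if not next_stripped.startswith('•'):
--         i += 1
--         continue
--     if 'http' in stripped and stripped.endswith('..'):
--       parts = stripped.split()
--       if parts and parts[-1].startswith('http') and parts[-1].endswith('..'):
--         prefix = ' '.join(parts[:-1]).rstrip(' :;,')
--         stripped = prefix + '..'
--     filtered.append(indent + stripped)
--     i += 1
--   final_lines = []
--   for ln in filtered:
--     if ln == '...':
--       while final_lines and final_lines[-1] == '':
--         final_lines.pop()
--       final_lines.append(ln)
--     else:
--       final_lines.append(ln)
--   while final_lines and final_lines[-1] == '':
--     final_lines.pop()
--   return '\n'.join(final_lines)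
-- ===== SOURCE B (Python) =====
-- def _final_filter(content: str) -> str:
--   out = []            # kept lines, built back to front
--   drop = True         # True while empty lines should vanish: at the end of the
--                       # output or directly above a '...' line
--   next_stripped = ''
--   lines = content.splitlines()
--   for raw in reversed(lines):
--     stripped = raw.strip()
--     if stripped.startswith('**') and stripped.endswith('**') and stripped.count('**') == 2:
--       keep = stripped
--     elif stripped.startswith('**') and stripped.endswith('**') and not next_stripped.startswith('•'):
--       keep = None     # dropped bold heading
--     else:
--       if 'http' in stripped and stripped.endswith('..'):
--         parts = stripped.split()
--         if parts and parts[-1].startswith('http') and parts[-1].endswith('..'):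
--           stripped = ' '.join(parts[:-1]).rstrip(' :;,') + '..'
--       keep = raw[: len(raw) - len(raw.lstrip('\u00A0 '))] + stripped
--     next_stripped = raw.strip()
--     if keep is None or (keep == '' and drop):
--       continue
--     out.append(keep)
--     drop = (keep == '...')
--   out.reverse()
--   return '\n'.join(out)
-- ===== Notes on version B (the rewrite author's own statement) =====
-- stated objective: alternative
-- what changed: A builds an intermediate filtered list and then rescans it left-to-right, popping trailing empty strings each time a '...' line appears and again at the end; B makes one right-to-left pass over the original lines (the bold-heading lookahead becomes the previously processed line's strip), deciding each empty line's fate immediately with a boolean 'drop' flag (empty lines vanish iff the next kept line below is '...' or none), so there is no intermediate list and no popping at all.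
import Mathlib
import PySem

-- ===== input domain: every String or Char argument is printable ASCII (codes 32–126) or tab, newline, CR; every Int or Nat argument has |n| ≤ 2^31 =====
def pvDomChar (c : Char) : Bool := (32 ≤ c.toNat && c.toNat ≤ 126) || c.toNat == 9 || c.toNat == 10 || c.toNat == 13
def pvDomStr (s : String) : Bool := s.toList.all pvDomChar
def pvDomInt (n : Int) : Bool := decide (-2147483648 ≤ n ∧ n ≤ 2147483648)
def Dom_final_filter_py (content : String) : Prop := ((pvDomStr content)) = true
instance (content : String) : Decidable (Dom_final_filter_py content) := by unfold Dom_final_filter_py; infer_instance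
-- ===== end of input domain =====

-- B replaces A's two-pass scheme (intermediate list, then a rescan popping trailing empties
-- before each '...' and at the end) by one right-to-left pass with a boolean 'drop' flag;
-- no popping, no intermediate list (objective: alternative algorithm, same cost class).

-- ===== PORT A =====
-- s.lstrip(chars): drop leading characters belonging to `chars` (exact port of str.lstrip(chars))
def pvLstripSet (s chars : List Char) : List Char := s.dropWhile (fun c => chars.contains c)
-- s.rstrip(chars): drop trailing characters belonging to `chars` (exact port of str.rstrip(chars))
def pvRstripSet (s chars : List Char) : List Char := (s.reverse.dropWhile (fun c => chars.contains c)).reverse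
-- `while xs and xs[-1] == '': xs.pop()` (A's pop loops)
def pvPopTrailEmpty (l : List (List Char)) : List (List Char) :=
  if h : l.getLast? = some [] then pvPopTrailEmpty l.dropLast else l
  termination_by l.length
  decreasing_by
    have hne : l ≠ [] := by intro e; subst e; simp at h
    have : 0 < l.length := List.length_pos_iff.mpr hne
    simp [List.length_dropLast]; omega

-- A's first while-loop: index walk with lookahead `lines[i+1]` = head of the remaining list
def pvLoopA : List (List Char) → List (List Char) → List (List Char)
  | acc, [] => acc
  | acc, raw :: rest =>
    let indent := PySem.Chars.slice raw none
      (some ((raw.length : Int) - ((pvLstripSet raw ['\u00A0', ' ']).length : Int)))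
    let stripped := PySem.Chars.strip raw
    if PySem.Chars.startswith stripped "**".toList && PySem.Chars.endswith stripped "**".toList
        && (PySem.Chars.count stripped "**".toList == 2) then
      pvLoopA (acc ++ [stripped]) rest
    else if PySem.Chars.startswith stripped "**".toList && PySem.Chars.endswith stripped "**".toList
        && !(PySem.Chars.startswith (match rest with | [] => [] | nraw :: _ => PySem.Chars.strip nraw) "•".toList) then
      pvLoopA acc rest
    else
      let stripped2 :=
        if PySem.Chars.isIn "http".toList stripped && PySem.Chars.endswith stripped "..".toList then
          let parts := PySem.Chars.split₀ stripped
          -- `if parts and parts[-1]…`: getLast? is none exactly when `parts` is empty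
          match parts.getLast? with
          | some lastPart =>
            if PySem.Chars.startswith lastPart "http".toList && PySem.Chars.endswith lastPart "..".toList then
              pvRstripSet (PySem.Chars.join " ".toList (PySem.List.slice parts none (some (-1)))) [' ', ':', ';', ','] ++ "..".toList
            else stripped
          | none => stripped
        else stripped
      pvLoopA (acc ++ [indent ++ stripped2]) rest

def final_filter_py (content : String) : String :=
  let lines := PySem.Chars.splitlines content.toList
  let filtered := pvLoopA [] lines
  let finalLines := filtered.foldl
    (fun fin ln => if ln == "...".toList then pvPopTrailEmpty fin ++ [ln] else fin ++ [ln]) []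
  String.ofList (PySem.Chars.join "\n".toList (pvPopTrailEmpty finalLines))

-- ===== PORT B =====
-- B's `for raw in reversed(lines)` with state (out, drop, next_stripped), appending to `out`
-- and reversing it at the end: ported as the equivalent structural recursion from the right,
-- consing onto the already-final-order output.
def pvLoopB : List (List Char) → List (List Char) × Bool × List Char
  | [] => ([], true, [])
  | raw :: rest =>
    let s := pvLoopB rest
    let stripped := PySem.Chars.strip raw
    let keep : Option (List Char) :=
      if PySem.Chars.startswith stripped "**".toList && PySem.Chars.endswith stripped "**".toList
          && (PySem.Chars.count stripped "**".toList == 2) then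
        some stripped
      else if PySem.Chars.startswith stripped "**".toList && PySem.Chars.endswith stripped "**".toList
          && !(PySem.Chars.startswith s.2.2 "•".toList) then
        none  -- dropped bold heading
      else
        let stripped2 :=
          if PySem.Chars.isIn "http".toList stripped && PySem.Chars.endswith stripped "..".toList then
            let parts := PySem.Chars.split₀ stripped
            match parts.getLast? with
            | some lastPart =>
              if PySem.Chars.startswith lastPart "http".toList && PySem.Chars.endswith lastPart "..".toList then
                pvRstripSet (PySem.Chars.join " ".toList (PySem.List.slice parts none (some (-1)))) [' ', ':', ';', ','] ++ "..".toList
              else stripped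
            | none => stripped
          else stripped
        some (PySem.Chars.slice raw none
          (some ((raw.length : Int) - ((pvLstripSet raw ['\u00A0', ' ']).length : Int))) ++ stripped2)
    match keep with
    | none => (s.1, s.2.1, PySem.Chars.strip raw)
    | some k =>
      if k == [] && s.2.1 then (s.1, s.2.1, PySem.Chars.strip raw)
      else (k :: s.1, k == "...".toList, PySem.Chars.strip raw)

def final_filter_py_alt (content : String) : String :=
  String.ofList (PySem.Chars.join "\n".toList (pvLoopB (PySem.Chars.splitlines content.toList)).1)

-- ===== PRECONDITION & SPEC =====
def Spec_final_filter_py (content : String) (out : String) : Prop := out = final_filter_py_alt content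
instance (content : String) (out : String) : Decidable (Spec_final_filter_py content out) := by unfold Spec_final_filter_py; infer_instance

-- ===== CLAIM (what is proved, stated in full; the proofs are below) =====
def Claim_equal_final_filter_py : Prop := ∀ (content : String), Dom_final_filter_py content → Spec_final_filter_py content (final_filter_py content)

-- ===== LEMMAS AND PROOFS =====

-- the per-line cleaning (phase one) as a function of the raw line and the next line's strip
def pvClean (raw nextStripped : List Char) : Option (List Char) :=
  let stripped := PySem.Chars.strip raw
  if PySem.Chars.startswith stripped "**".toList && PySem.Chars.endswith stripped "**".toList
      && (PySem.Chars.count stripped "**".toList == 2) then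
    some stripped
  else if PySem.Chars.startswith stripped "**".toList && PySem.Chars.endswith stripped "**".toList
      && !(PySem.Chars.startswith nextStripped "•".toList) then
    none
  else
    let stripped2 :=
      if PySem.Chars.isIn "http".toList stripped && PySem.Chars.endswith stripped "..".toList then
        let parts := PySem.Chars.split₀ stripped
        match parts.getLast? with
        | some lastPart =>
          if PySem.Chars.startswith lastPart "http".toList && PySem.Chars.endswith lastPart "..".toList then
            pvRstripSet (PySem.Chars.join " ".toList (PySem.List.slice parts none (some (-1)))) [' ', ':', ';', ','] ++ "..".toList
          else stripped
        | none => stripped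
      else stripped
    some (PySem.Chars.slice raw none
      (some ((raw.length : Int) - ((pvLstripSet raw ['\u00A0', ' ']).length : Int))) ++ stripped2)

def pvNextOf : List (List Char) → List Char
  | [] => []
  | n :: _ => PySem.Chars.strip n

def pvFilteredOf : List (List Char) → List (List Char)
  | [] => []
  | raw :: rest =>
    match pvClean raw (pvNextOf rest) with
    | some l => l :: pvFilteredOf rest
    | none => pvFilteredOf rest

-- phase two computed right-to-left with a drop flag
def pvPhase2R : List (List Char) → List (List Char) × Bool
  | [] => ([], true)
  | l :: rest =>
    let p := pvPhase2R rest
    if l == [] && p.2 then p else (l :: p.1, l == "...".toList)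

theorem pvLoopA_filteredOf (ls : List (List Char)) : ∀ acc, pvLoopA acc ls = acc ++ pvFilteredOf ls := by
  induction ls with
  | nil => intro acc; simp [pvLoopA, pvFilteredOf]
  | cons raw rest ih =>
    intro acc
    simp only [pvLoopA, pvFilteredOf, pvClean, pvNextOf]
    split_ifs <;> simp [ih]

theorem pvLoopB_eq (ls : List (List Char)) :
    pvLoopB ls = ((pvPhase2R (pvFilteredOf ls)).1, (pvPhase2R (pvFilteredOf ls)).2, pvNextOf ls) := by
  induction ls with
  | nil => simp [pvLoopB, pvFilteredOf, pvPhase2R, pvNextOf]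
  | cons raw rest ih =>
    simp only [pvLoopB, ih, pvFilteredOf, pvClean, pvNextOf]
    split_ifs <;> simp [pvPhase2R] <;> split_ifs <;> simp_all

theorem pvPop_app_nil (acc : List (List Char)) : pvPopTrailEmpty (acc ++ [[]]) = pvPopTrailEmpty acc := by
  rw [pvPopTrailEmpty]; simp

theorem pvPop_app_ne (acc : List (List Char)) (l : List Char) (h : l ≠ []) :
    pvPopTrailEmpty (acc ++ [l]) = acc ++ [l] := by
  rw [pvPopTrailEmpty]; simp [h]

theorem pvMain (fl : List (List Char)) : ∀ acc,
    pvPopTrailEmpty (fl.foldl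
      (fun fin ln => if ln == "...".toList then pvPopTrailEmpty fin ++ [ln] else fin ++ [ln]) acc)
    = (if (pvPhase2R fl).2 then pvPopTrailEmpty acc else acc) ++ (pvPhase2R fl).1 := by
  induction fl with
  | nil => intro acc; simp [pvPhase2R]
  | cons l rest ih =>
    intro acc
    simp only [List.foldl_cons, ih, pvPhase2R]
    by_cases hl : l = []
    · subst hl
      by_cases hd : (pvPhase2R rest).2
      · simp [hd, pvPop_app_nil]
      · simp [hd]
    · have hne : (l == ([] : List Char)) = false := by simp [hl]
      have hlit : "...".toList = ['.', '.', '.'] := rfl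
      by_cases hdots : l = ['.', '.', '.']
      · subst hdots
        by_cases hd : (pvPhase2R rest).2 <;>
          simp [hd, hne, hlit, pvPop_app_ne _ _ hl]
      · by_cases hd : (pvPhase2R rest).2 <;>
          simp [hd, hne, hlit, hdots, pvPop_app_ne _ _ hl]

-- ===== VERDICT (by name: the statement is the Claim_ definition above) =====
theorem final_filter_py_spec : Claim_equal_final_filter_py := by
  intro content _
  unfold Spec_final_filter_py
  simp only [final_filter_py, final_filter_py_alt]
  rw [pvLoopA_filteredOf, pvLoopB_eq, List.nil_append, pvMain]
  simp [pvPopTrailEmpty]
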